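-- pv_equiv track=rewrite | github.com/erumbold/Class-Pairs | ClassPairs.py | need_reset
-- ===== SOURCE A (Python) =====
-- def need_reset(class_list):
--     '''
--     checks list of student info to see if all pairings have been met
--     Args: class_list
--     Returns: True if file needs to be reset; False otherwise
--     '''
--     tally = list()
--     for row in class_list:
--         count = 0
--         for col in row:
--             if col != "ABSENT" and col != "YOU PICK":
--                 count += 1
--         tally.append(count)
--     count = 0
--     for i in tally:
--         if i > len(class_list) * 0.75:
--             count += 1
--     if count > 0.75 * len(class_list):
--         return True
--     else:
--         return False
-- ===== SOURCE B (Python) =====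
-- def need_reset(class_list):
--     '''
--     checks list of student info to see if all pairings have been met
--     Args: class_list
--     Returns: True if file needs to be reset; False otherwise
--     '''
--     # Order-statistic formulation: more than 0.75*n rows qualify  <=>  at least
--     # floor(3n/4)+1 rows qualify  <=>  the (floor(3n/4)+1)-th largest per-row
--     # count itself qualifies.  So sort the per-row counts descending and test
--     # the single count at index k = floor(3n/4).
--     n = len(class_list)
--     counts = sorted((sum(1 for col in row if col not in ("ABSENT", "YOU PICK"))
--                      for row in class_list), reverse=True)
--     k = (3 * n) // 4
--     return k < n and counts[k] > n * 0.75
-- ===== Notes on version B (the rewrite author's own statement) =====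
-- stated objective: alternative
-- what changed: Replaces A's count-of-qualifying-rows pass by an order statistic: sort the per-row counts descending and test the single count at index floor(3n/4), since more than 0.75*n rows qualify iff the (floor(3n/4)+1)-th largest count qualifies.
import Mathlib
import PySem

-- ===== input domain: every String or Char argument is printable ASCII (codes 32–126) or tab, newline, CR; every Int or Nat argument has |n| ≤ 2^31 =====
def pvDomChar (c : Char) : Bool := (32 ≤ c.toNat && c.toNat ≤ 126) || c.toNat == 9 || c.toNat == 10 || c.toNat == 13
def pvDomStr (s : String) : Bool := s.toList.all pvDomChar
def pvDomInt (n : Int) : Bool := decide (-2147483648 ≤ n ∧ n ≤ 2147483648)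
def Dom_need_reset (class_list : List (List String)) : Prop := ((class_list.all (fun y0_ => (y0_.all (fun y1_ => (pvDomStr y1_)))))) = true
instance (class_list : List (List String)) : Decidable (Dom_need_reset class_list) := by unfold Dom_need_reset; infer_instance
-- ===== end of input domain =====

-- B replaces A's qualifying-row count by an order statistic: sort per-row counts descending, test the count at index floor(3n/4); objective: alternative.


-- ===== PORT A =====
-- inner loop: count of cells ≠ "ABSENT" and ≠ "YOU PICK"
def pvRowCount (row : List String) : Int :=
  row.foldl (fun count col => if col ≠ "ABSENT" ∧ col ≠ "YOU PICK" then count + 1 else count) 0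
-- The float comparisons `i > len(class_list) * 0.75` / `count > 0.75 * len(class_list)` are
-- ported as `4*i > 3*n`, which is EXACT: for 0 ≤ n ≤ 2^31 the double `n * 0.75` equals the
-- rational 3n/4, so `i > n*0.75 ↔ 4i > 3n` for integer i.
def need_reset (class_list : List (List String)) : Bool :=
  let tally := class_list.foldl (fun t row => t ++ [pvRowCount row]) []
  let count := tally.foldl
    (fun count i => if 4 * i > 3 * (class_list.length : Int) then count + 1 else count) (0 : Int)
  if 4 * count > 3 * (class_list.length : Int) then true else false

-- ===== PORT B =====
-- sum(1 for col in row if col not in ("ABSENT", "YOU PICK"))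
def pvRowPresent (row : List String) : Int :=
  row.foldl (fun s col => if ¬ (col = "ABSENT" ∨ col = "YOU PICK") then s + 1 else s) 0
-- `counts[k] > n * 0.75` is ported exactly as `4*counts[k] > 3*n` (see the note on Port A).
-- `k < n` is the Python guard; `counts.length = n` (sorted preserves length), so the indexing
-- `counts[k]` in the guarded branch is the Python `counts[k]` (in range, no IndexError).
def need_reset_alt (class_list : List (List String)) : Bool :=
  let n := class_list.length
  let counts := PySem.List.sorted (class_list.map pvRowPresent) (fun x => x) true
  let k := (3 * n) / 4
  if h : k < counts.length then
    decide (4 * counts[k] > 3 * (n : Int))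
  else false

-- ===== PRECONDITION & SPEC =====
def Spec_need_reset (class_list : List (List String)) (out : Bool) : Prop := out = need_reset_alt class_list
instance (class_list : List (List String)) (out : Bool) : Decidable (Spec_need_reset class_list out) := by unfold Spec_need_reset; infer_instance

-- ===== CLAIM (what is proved, stated in full; the proofs are below) =====
def Claim_equal_need_reset : Prop := ∀ (class_list : List (List String)), Dom_need_reset class_list → Spec_need_reset class_list (need_reset class_list)

-- ===== LEMMAS AND PROOFS =====

-- the two per-row counters agree
theorem pvRow_eq (row : List String) : pvRowCount row = pvRowPresent row := by
  unfold pvRowCount pvRowPresent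
  have h : ∀ (acc : Int),
      row.foldl (fun count col => if col ≠ "ABSENT" ∧ col ≠ "YOU PICK" then count + 1 else count) acc
      = row.foldl (fun s col => if ¬ (col = "ABSENT" ∨ col = "YOU PICK") then s + 1 else s) acc := by
    induction row with
    | nil => intro acc; rfl
    | cons x xs ih =>
      intro acc
      simp only [List.foldl_cons, ih]
      congr 1
      by_cases h1 : x = "ABSENT" <;> by_cases h2 : x = "YOU PICK" <;> simp [h1, h2]
  exact h 0

-- A's tally loop builds the map
theorem pvTally_eq (f : List String → Int) (l : List (List String)) (acc : List Int) :
    l.foldl (fun t row => t ++ [f row]) acc = acc ++ l.map f := by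
  induction l generalizing acc with
  | nil => simp
  | cons r rs ih => simp [List.foldl_cons, ih]

-- A's counting loop is a countP (as an Int)
theorem pvCount_eq (t : Int) (l : List Int) (acc : Int) :
    l.foldl (fun count i => if 4 * i > t then count + 1 else count) acc
      = acc + (l.countP (fun i => decide (t < 4 * i)) : Int) := by
  induction l generalizing acc with
  | nil => simp
  | cons x xs ih =>
    simp only [List.foldl_cons, List.countP_cons, ih]
    by_cases h : t < 4 * x <;> simp [h] <;> push_cast <;> ring

-- order-statistic characterisation: on a descending list, at least k+1 elements
-- exceed the threshold iff the element at index k does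
theorem pvDescCount (t : Int) (d : List Int) (hd : d.Pairwise (fun a b => b ≤ a)) (k : Nat) :
    (k + 1 ≤ d.countP (fun c => decide (t < 4 * c))) ↔
      (∃ c, d[k]? = some c ∧ t < 4 * c) := by
  induction d generalizing k with
  | nil => simp
  | cons a d ih =>
    rcases List.pairwise_cons.mp hd with ⟨ha, hd'⟩
    by_cases hta : t < 4 * a
    · cases k with
      | zero =>
        simp only [List.countP_cons, List.getElem?_cons_zero, hta]
        constructor
        · intro _; exact ⟨a, rfl, hta⟩
        · intro _; simp
      | succ k =>
        simp only [List.countP_cons, List.getElem?_cons_succ]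
        rw [← ih hd' k]
        simp [hta]
    · have hzero : d.countP (fun c => decide (t < 4 * c)) = 0 := by
        rw [List.countP_eq_zero]
        intro c hc
        have := ha c hc
        simp; omega
      have hzero' : (a :: d).countP (fun c => decide (t < 4 * c)) = 0 := by
        simp [List.countP_cons, hzero, hta]
      rw [hzero']
      cases k with
      | zero =>
        simp only [List.getElem?_cons_zero]
        constructor
        · omega
        · rintro ⟨c, hc, htc⟩
          cases hc; omega
      | succ k =>
        simp only [List.getElem?_cons_succ]
        rw [← ih hd' k, hzero]
        omega

-- ===== VERDICT (by name: the statement is the Claim_ definition above) =====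
theorem need_reset_spec : Claim_equal_need_reset := by
  intro l _
  unfold Spec_need_reset need_reset need_reset_alt
  simp only [pvTally_eq, List.nil_append, pvCount_eq, zero_add]
  set n := l.length with hn
  set k := (3 * n) / 4 with hk
  set xs := l.map pvRowCount with hxs
  set d := PySem.List.sorted (l.map pvRowPresent) (fun x => x) true with hd
  have hperm : d.Perm xs := by
    rw [hd, hxs]
    have := PySem.List.sorted_perm (l.map pvRowPresent) (fun x => x) true
    refine this.trans ?_
    simp [List.map_congr_left (fun r _ => (pvRow_eq r).symm)]
  have hcnt : xs.countP (fun i => decide (3 * (n : Int) < 4 * i))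
      = d.countP (fun i => decide (3 * (n : Int) < 4 * i)) := (hperm.countP_eq _).symm
  have hlen : d.length = n := by
    rw [hd]; rw [PySem.List.length_sorted]; simp [hn]
  have hpair : d.Pairwise (fun a b => b ≤ a) := by
    rw [hd]
    simpa using PySem.List.sorted_pairwise_rev (l.map pvRowPresent) (fun x => x)
  have hchar := pvDescCount (3 * (n : Int)) d hpair k
  -- the qualifying count q exceeds 3n/4 iff q ≥ k+1
  set q := d.countP (fun i => decide (3 * (n : Int) < 4 * i)) with hq
  have hq_le : q ≤ n := by rw [hq, ← hlen]; exact List.countP_le_length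
  have harith : (3 * (n : Int) < 4 * (q : Int)) ↔ (k + 1 ≤ q) := by
    constructor <;> intro h
    · have : 3 * n < 4 * q := by exact_mod_cast h
      omega
    · have : 3 * n < 4 * q := by omega
      exact_mod_cast this
  rw [hcnt]
  by_cases hkn : k < d.length
  · rw [dif_pos hkn]
    have hsome : d[k]? = some d[k] := List.getElem?_eq_getElem hkn
    by_cases hb : 3 * (n : Int) < 4 * d[k]
    · have h1 : k + 1 ≤ q := hchar.mpr ⟨d[k], hsome, hb⟩
      rw [if_pos (harith.mpr h1)]
      simp [hb]
    · have h2 : ¬ (k + 1 ≤ q) := by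
        intro hle
        rcases hchar.mp hle with ⟨c, hc, htc⟩
        rw [hsome] at hc; cases hc; exact hb htc
      rw [if_neg (fun h => h2 (harith.mp h))]
      simp [hb]
  · rw [dif_neg hkn]
    rw [hlen] at hkn
    have h3 : ¬ (k + 1 ≤ q) := by omega
    rw [if_neg (fun h => h3 (harith.mp h))]
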